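-- pv_equiv track=rewrite | github.com/hyunjune-lee/python_algorithm_interview | Brute Force/PG - 모의고사.py | solution
-- ===== SOURCE A (Python) =====
-- def solution(answers):
-- 	answer = []
-- 	one = [1,2,3,4,5]
-- 	two = [2,1,2,3,2,4,2,5]
-- 	three = [3,3,1,1,2,2,4,4,5,5]
-- 	ans_count = [0,0,0]
-- 	for idx, ans in enumerate(answers):
-- 		if one[idx % len(one)] == ans:
-- 			ans_count[0] += 1
-- 		if two[idx % len(two)] == ans:
-- 			ans_count[1] += 1
-- 		if three[idx % len(three)] == ans:
-- 			ans_count[2] += 1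
-- 	for idx, count in enumerate(ans_count):
-- 		if count == max(ans_count):
-- 			answer.append(idx + 1)
-- 	return answer
-- ===== SOURCE B (Python) =====
-- def solution(answers):
--     patterns = ([1, 2, 3, 4, 5],
--                 [2, 1, 2, 3, 2, 4, 2, 5],
--                 [3, 3, 1, 1, 2, 2, 4, 4, 5, 5])
--
--     def score(pat):
--         # rotating-suffix scan: walk the remaining suffix of the pattern,
--         # refilling it when exhausted -- no index arithmetic, no modulo
--         rem, s = pat, 0
--         for a in answers:
--             if not rem:
--                 rem = pat
--             s += rem[0] == a
--             rem = rem[1:]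
--         return s
--
--     scores = [score(p) for p in patterns]
--     best = max(scores)
--     return [i + 1 for i, s in enumerate(scores) if s == best]
-- ===== Notes on version B (the rewrite author's own statement) =====
-- stated objective: alternative
-- what changed: B replaces A's single answer-major scan with three parallel counters and idx%len pattern indexing by three independent rotating-suffix scans: each pattern's score walks the remaining pattern suffix, refilling it when exhausted, with no enumerate and no modulo arithmetic; the winners are then read off the scores list.
import Mathlib
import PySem

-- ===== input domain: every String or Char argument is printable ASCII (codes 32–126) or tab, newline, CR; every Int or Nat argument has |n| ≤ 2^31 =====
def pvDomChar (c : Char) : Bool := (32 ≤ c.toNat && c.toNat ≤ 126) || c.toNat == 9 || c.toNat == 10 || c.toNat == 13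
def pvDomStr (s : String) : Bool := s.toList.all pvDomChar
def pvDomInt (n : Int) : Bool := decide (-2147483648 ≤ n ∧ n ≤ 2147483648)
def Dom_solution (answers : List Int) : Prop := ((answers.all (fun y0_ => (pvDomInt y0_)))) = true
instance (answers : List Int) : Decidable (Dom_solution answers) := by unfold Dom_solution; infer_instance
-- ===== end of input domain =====

-- B scores each pattern by a rotating-suffix scan (walk the remaining pattern suffix, refill it
-- when exhausted; no enumerate, no modulo) instead of A's single answer-major scan with three
-- parallel counters indexed by idx % len; same cost, a different algorithmic mechanism.

-- ===== PORT A =====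
-- single pass over enumerate(answers); ans_count (a 3-element list indexed only by the
-- constants 0,1,2) is represented as a triple of counters
def solution (answers : List Int) : List Int :=
  let one : List Int := [1,2,3,4,5]
  let two : List Int := [2,1,2,3,2,4,2,5]
  let three : List Int := [3,3,1,1,2,2,4,4,5,5]
  let ans_count : Int × Int × Int :=
    (PySem.List.enumerate answers).foldl
      (fun c p =>
        let c := if PySem.List.pyGetD one (PySem.Int.mod p.1 5) 0 == p.2 then (c.1 + 1, c.2.1, c.2.2) else c
        let c := if PySem.List.pyGetD two (PySem.Int.mod p.1 8) 0 == p.2 then (c.1, c.2.1 + 1, c.2.2) else c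
        if PySem.List.pyGetD three (PySem.Int.mod p.1 10) 0 == p.2 then (c.1, c.2.1, c.2.2 + 1) else c)
      (0, 0, 0)
  -- max(ans_count) on the (nonempty) 3-element list
  let mx := (PySem.List.max? [ans_count.1, ans_count.2.1, ans_count.2.2] (fun x => x)).getD 0
  (PySem.List.enumerate [ans_count.1, ans_count.2.1, ans_count.2.2]).foldl
    (fun acc p => if p.2 == mx then acc ++ [p.1 + 1] else acc) []

-- ===== PORT B =====
-- one loop iteration of B's score(): state = (running score, remaining pattern suffix);
-- rem[0] is headD (exact here: the refilled rem is one of the nonempty pattern literals),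
-- rem[1:] is tail
def pvStepB (pat : List Int) (st : Int × List Int) (a : Int) : Int × List Int :=
  let rem := if st.2.isEmpty then pat else st.2
  (st.1 + (if rem.headD 0 == a then 1 else 0), rem.tail)

def pvScore (pat : List Int) (answers : List Int) : Int :=
  (answers.foldl (pvStepB pat) (0, pat)).1

def solution_alt (answers : List Int) : List Int :=
  let patterns : List (List Int) := [[1,2,3,4,5], [2,1,2,3,2,4,2,5], [3,3,1,1,2,2,4,4,5,5]]
  let scores := patterns.map (fun pat => pvScore pat answers)
  let best := (PySem.List.max? scores (fun x => x)).getD 0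
  ((PySem.List.enumerate scores).filter (fun p => p.2 == best)).map (fun p => p.1 + 1)

-- ===== PRECONDITION & SPEC =====
def Spec_solution (answers : List Int) (out : List Int) : Prop := out = solution_alt answers
instance (answers : List Int) (out : List Int) : Decidable (Spec_solution answers out) := by unfold Spec_solution; infer_instance

-- ===== CLAIM (what is proved, stated in full; the proofs are below) =====
def Claim_equal_solution : Prop := ∀ (answers : List Int), Dom_solution answers → Spec_solution answers (solution answers)

-- ===== LEMMAS AND PROOFS =====

-- one step of A's counter update, as a named function
def pvStep (c : Int × Int × Int) (p : Int × Int) : Int × Int × Int :=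
  let c := if PySem.List.pyGetD [1,2,3,4,5] (PySem.Int.mod p.1 5) 0 == p.2 then (c.1 + 1, c.2.1, c.2.2) else c
  let c := if PySem.List.pyGetD [2,1,2,3,2,4,2,5] (PySem.Int.mod p.1 8) 0 == p.2 then (c.1, c.2.1 + 1, c.2.2) else c
  if PySem.List.pyGetD [3,3,1,1,2,2,4,4,5,5] (PySem.Int.mod p.1 10) 0 == p.2 then (c.1, c.2.1, c.2.2 + 1) else c

-- 0/1 indicator: does answer x at (0-based) position s match pattern pat cyclically?
def pvInd (pat : List Int) (p : Int × Int) : Int :=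
  if PySem.List.pyGetD pat (PySem.Int.mod p.1 (pat.length : Int)) 0 == p.2 then 1 else 0

-- cyclic match count of l against pat starting at position s (the common specification)
def pvCnt (pat : List Int) (l : List Int) (s : Int) : Int :=
  (PySem.List.enumerate l s).foldl (fun t p => t + pvInd pat p) 0

lemma pvCnt_cons (pat : List Int) (x : Int) (l : List Int) (s : Int) :
    pvCnt pat (x :: l) s = pvInd pat (s, x) + pvCnt pat l (s + 1) := by
  unfold pvCnt
  rw [PySem.List.enumerate_cons, List.foldl_cons,
      PySem.List.foldl_add (l := PySem.List.enumerate l (s + 1)) (g := pvInd pat),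
      PySem.List.foldl_add (l := PySem.List.enumerate l (s + 1)) (g := pvInd pat)]
  simp

-- A's interleaved step adds exactly the three cyclic indicators to the three counters
lemma pvStep_eq (a b c s x : Int) :
    pvStep (a, b, c) (s, x)
      = (a + pvInd [1,2,3,4,5] (s, x), b + pvInd [2,1,2,3,2,4,2,5] (s, x), c + pvInd [3,3,1,1,2,2,4,4,5,5] (s, x)) := by
  unfold pvStep pvInd
  norm_num
  split_ifs <;> simp

-- A's single fold computes the triple of the three cyclic match counts
lemma pvFold_key (l : List Int) (s a b c : Int) :
    (PySem.List.enumerate l s).foldl pvStep (a, b, c)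
      = (a + pvCnt [1,2,3,4,5] l s, b + pvCnt [2,1,2,3,2,4,2,5] l s, c + pvCnt [3,3,1,1,2,2,4,4,5,5] l s) := by
  induction l generalizing s a b c with
  | nil => simp [pvCnt, PySem.List.enumerate_nil]
  | cons x t ih =>
    rw [PySem.List.enumerate_cons, List.foldl_cons, pvStep_eq, ih,
        pvCnt_cons, pvCnt_cons, pvCnt_cons]
    simp [add_assoc]

-- the refill is transparent: a fold started from the exhausted (empty) suffix computes the
-- same score as one started from the full pattern
lemma pvFoldB_refill (pat : List Int) (hp : pat ≠ []) (xs : List Int) (acc : Int) :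
    (xs.foldl (pvStepB pat) (acc, ([] : List Int))).1 = (xs.foldl (pvStepB pat) (acc, pat)).1 := by
  cases xs with
  | nil => rfl
  | cons a t =>
    have h : pvStepB pat (acc, ([] : List Int)) a = pvStepB pat (acc, pat) a := by
      simp [pvStepB, List.isEmpty_iff, hp]
    rw [List.foldl_cons, List.foldl_cons, h]

-- key invariant of B's rotating-suffix scan: from suffix pat.drop k at position s with
-- s % len = k, the fold adds exactly the cyclic match count
lemma pvFoldB_key (pat : List Int) (hp : pat ≠ []) (xs : List Int) :
    ∀ (k : Nat) (s acc : Int), k < pat.length → 0 ≤ s →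
      s % (pat.length : Int) = (k : Int) →
      (xs.foldl (pvStepB pat) (acc, pat.drop k)).1 = acc + pvCnt pat xs s := by
  induction xs with
  | nil => intro k s acc hk hs0 hs; simp [pvCnt, PySem.List.enumerate_nil]
  | cons a t ih =>
    intro k s acc hk hs0 hs
    have hLpos : (0 : Int) < (pat.length : Int) := by exact_mod_cast List.length_pos_of_ne_nil hp
    have hdrop : pat.drop k = pat[k] :: pat.drop (k + 1) := List.drop_eq_getElem_cons hk
    have hstep1 : pvStepB pat (acc, pat.drop k) a
        = (acc + (if pat[k] == a then 1 else 0), pat.drop (k + 1)) := by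
      rw [hdrop]; rfl
    have hind : pvInd pat (s, a) = (if pat[k] == a then 1 else 0) := by
      unfold pvInd
      rw [show PySem.Int.mod s (pat.length : Int) = s % (pat.length : Int) from
            PySem.Int.mod_eq_emod_of_pos hLpos, hs, PySem.List.pyGetD_natCast,
          List.getD_eq_getElem pat 0 hk]
    -- decompose s by the division identity
    have hsq : s = (pat.length : Int) * (s / (pat.length : Int)) + (k : Int) := by
      have h := Int.mul_ediv_add_emod s (pat.length : Int); omega
    rw [List.foldl_cons, hstep1, pvCnt_cons, hind]
    by_cases hkk : k + 1 < pat.length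
    · have hmod : (s + 1) % (pat.length : Int) = ((k + 1 : Nat) : Int) := by
        rw [show s + 1 = ((k + 1 : Nat) : Int) + (pat.length : Int) * (s / (pat.length : Int)) by
              push_cast; omega,
            Int.add_mul_emod_self_left]
        exact Int.emod_eq_of_lt (by positivity) (by exact_mod_cast hkk)
      rw [ih (k + 1) (s + 1) _ hkk (by omega) hmod]; omega
    · have hkL : k + 1 = pat.length := by omega
      have hnil : pat.drop (k + 1) = [] := by rw [hkL, List.drop_length]
      rw [hnil, pvFoldB_refill pat hp t]
      have hmod : (s + 1) % (pat.length : Int) = ((0 : Nat) : Int) := by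
        have hkLi : ((k : Int) + 1) = (pat.length : Int) := by exact_mod_cast hkL
        rw [show s + 1 = (pat.length : Int) * (s / (pat.length : Int) + 1) by
              rw [mul_add, mul_one]; omega,
            Int.mul_emod_right]
        rfl
      have h0 : (t.foldl (pvStepB pat) (acc + (if pat[k] == a then 1 else 0), pat.drop 0)).1
          = acc + (if pat[k] == a then 1 else 0) + pvCnt pat t (s + 1) :=
        ih 0 (s + 1) _ (List.length_pos_of_ne_nil hp) (by omega) hmod
      rw [List.drop_zero] at h0
      rw [h0]; omega

-- ===== VERDICT (by name: the statement is the Claim_ definition above) =====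
theorem solution_spec : Claim_equal_solution := by
  intro answers _
  unfold Spec_solution solution solution_alt
  have hstep : (fun (c : Int × Int × Int) (p : Int × Int) =>
        let c := if PySem.List.pyGetD [1,2,3,4,5] (PySem.Int.mod p.1 5) 0 == p.2 then (c.1 + 1, c.2.1, c.2.2) else c
        let c := if PySem.List.pyGetD [2,1,2,3,2,4,2,5] (PySem.Int.mod p.1 8) 0 == p.2 then (c.1, c.2.1 + 1, c.2.2) else c
        if PySem.List.pyGetD [3,3,1,1,2,2,4,4,5,5] (PySem.Int.mod p.1 10) 0 == p.2 then (c.1, c.2.1, c.2.2 + 1) else c)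
      = pvStep := rfl
  have hscore : ∀ (pat : List Int), pat ≠ [] → pvScore pat answers = pvCnt pat answers 0 := by
    intro pat hp
    have h := pvFoldB_key pat hp answers 0 0 0 (List.length_pos_of_ne_nil hp) (le_refl 0)
      (by simp)
    rw [List.drop_zero] at h
    simpa [pvScore] using h
  have h1 := hscore [1,2,3,4,5] (by decide)
  have h2 := hscore [2,1,2,3,2,4,2,5] (by decide)
  have h3 := hscore [3,3,1,1,2,2,4,4,5,5] (by decide)
  simp only [hstep, pvFold_key, List.map_cons, List.map_nil, h1, h2, h3, zero_add]
  simp only [PySem.List.enumerate_cons, PySem.List.enumerate_nil, List.foldl_cons, List.foldl_nil,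
    List.filter_cons, List.filter_nil]
  norm_num
  split_ifs <;> simp
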